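-- pv_equiv track=rewrite | github.com/jeroen85/OpenQuatt | scripts/simulate_heating_curve_history.py | count_hp1_starts_stops
-- ===== SOURCE A (Python) =====
-- from typing import Dict, Iterable, List, Optional, Sequence, Tuple
--
-- def count_hp1_starts_stops(levels: Iterable[Tuple[int, int]]) -> Tuple[int, int]:
--     starts = 0
--     stops = 0
--     previous: Optional[int] = None
--     for hp1, _ in levels:
--         if previous is not None:
--             if previous == 0 and hp1 > 0:
--                 starts += 1
--             elif previous > 0 and hp1 == 0:
--                 stops += 1
--         previous = hp1
--     return starts, stops
-- ===== SOURCE B (Python) =====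
-- from typing import Iterable, Tuple
--
-- def count_hp1_starts_stops(levels: Iterable[Tuple[int, int]]) -> Tuple[int, int]:
--     vals = [hp1 for hp1, _ in levels]
--     starts = sum(1 for p, c in zip(vals, vals[1:]) if p == 0 and c > 0)
--     stops = sum(1 for p, c in zip(vals, vals[1:]) if p > 0 and c == 0)
--     return starts, stops
-- ===== Notes on version B (the rewrite author's own statement) =====
-- stated objective: alternative
-- what changed: Replaces the single stateful loop carrying an Optional previous accumulator with a materialized value list and counting predicates over adjacent pairs (zip of the list with its tail).
import Mathlib
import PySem

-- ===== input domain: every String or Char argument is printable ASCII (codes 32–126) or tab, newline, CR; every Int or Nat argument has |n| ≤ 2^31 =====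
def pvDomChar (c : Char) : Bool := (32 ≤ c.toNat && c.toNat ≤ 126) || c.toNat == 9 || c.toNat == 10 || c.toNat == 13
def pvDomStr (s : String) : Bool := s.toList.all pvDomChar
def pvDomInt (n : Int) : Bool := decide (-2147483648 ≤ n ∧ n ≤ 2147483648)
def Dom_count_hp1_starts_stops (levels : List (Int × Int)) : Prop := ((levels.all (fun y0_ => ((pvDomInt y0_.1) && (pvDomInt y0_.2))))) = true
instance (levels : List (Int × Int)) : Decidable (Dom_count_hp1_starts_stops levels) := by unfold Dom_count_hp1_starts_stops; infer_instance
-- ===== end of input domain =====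

-- B replaces A's single stateful loop (mutable `previous` accumulator) with a materialized
-- value list and two counting passes over adjacent pairs (zip with tail); objective: alternative.
-- ===== PORT A =====
def count_hp1_starts_stops (levels : List (Int × Int)) : Int × Int :=
  let st := levels.foldl
    (fun (acc : Int × Int × Option Int) (p : Int × Int) =>
      let starts := acc.1
      let stops := acc.2.1
      let previous := acc.2.2
      match previous with
      | none => (starts, stops, some p.1)
      | some pv =>
        if pv = 0 ∧ p.1 > 0 then (starts + 1, stops, some p.1)
        else if pv > 0 ∧ p.1 = 0 then (starts, stops + 1, some p.1)
        else (starts, stops, some p.1))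
    (0, 0, none)
  (st.1, st.2.1)

-- ===== PORT B =====
def count_hp1_starts_stops_alt (levels : List (Int × Int)) : Int × Int :=
  let vals := levels.map Prod.fst
  let pairs := vals.zip vals.tail
  ((pairs.countP (fun pc => decide (pc.1 = 0) && decide (pc.2 > 0)) : Int),
   (pairs.countP (fun pc => decide (pc.1 > 0) && decide (pc.2 = 0)) : Int))

-- ===== PRECONDITION & SPEC =====
def Spec_count_hp1_starts_stops (levels : List (Int × Int)) (out : Int × Int) : Prop := out = count_hp1_starts_stops_alt levels
instance (levels : List (Int × Int)) (out : Int × Int) : Decidable (Spec_count_hp1_starts_stops levels out) := by unfold Spec_count_hp1_starts_stops; infer_instance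

-- ===== CLAIM (what is proved, stated in full; the proofs are below) =====
def Claim_equal_count_hp1_starts_stops : Prop := ∀ (levels : List (Int × Int)), Dom_count_hp1_starts_stops levels → Spec_count_hp1_starts_stops levels (count_hp1_starts_stops levels)

-- ===== LEMMAS AND PROOFS =====

-- the loop body of port A, named for the lemmas
def pvStepA (acc : Int × Int × Option Int) (p : Int × Int) : Int × Int × Option Int :=
  match acc.2.2 with
  | none => (acc.1, acc.2.1, some p.1)
  | some pv =>
    if pv = 0 ∧ p.1 > 0 then (acc.1 + 1, acc.2.1, some p.1)
    else if pv > 0 ∧ p.1 = 0 then (acc.1, acc.2.1 + 1, some p.1)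
    else (acc.1, acc.2.1, some p.1)

-- transition counts of the value sequence v :: l, computed recursively
def pvCnt (v : Int) (l : List Int) : Int × Int :=
  match l with
  | [] => (0, 0)
  | c :: rest =>
    let r := pvCnt c rest
    if v = 0 ∧ c > 0 then (r.1 + 1, r.2)
    else if v > 0 ∧ c = 0 then (r.1, r.2 + 1)
    else r

theorem A_cons (h : Int × Int) (t : List (Int × Int)) :
    count_hp1_starts_stops (h :: t)
      = ((t.foldl pvStepA (0, 0, some h.1)).1, (t.foldl pvStepA (0, 0, some h.1)).2.1) := rfl

theorem foldA_some (l : List (Int × Int)) :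
    ∀ (s t v : Int),
      ((l.foldl pvStepA (s, t, some v)).1, (l.foldl pvStepA (s, t, some v)).2.1)
        = (s + (pvCnt v (l.map Prod.fst)).1, t + (pvCnt v (l.map Prod.fst)).2) := by
  induction l with
  | nil => intro s t v; simp [pvCnt]
  | cons h rest ih =>
    intro s t v
    simp only [List.foldl, List.map_cons, pvStepA, pvCnt]
    split_ifs with h1 h2 <;> rw [ih] <;>
      simp only [Prod.mk.injEq] <;> constructor <;> dsimp only <;> omega

theorem cntStarts_eq (v : Int) (l : List Int) :
    (((v :: l).zip l).countP (fun pc => decide (pc.1 = 0) && decide (pc.2 > 0)) : Int)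
      = (pvCnt v l).1 := by
  induction l generalizing v with
  | nil => rfl
  | cons c rest ih =>
    simp only [List.zip_cons_cons, List.countP_cons, pvCnt]
    push_cast
    rw [ih c]
    split_ifs with h1 h2 <;> simp_all

theorem cntStops_eq (v : Int) (l : List Int) :
    (((v :: l).zip l).countP (fun pc => decide (pc.1 > 0) && decide (pc.2 = 0)) : Int)
      = (pvCnt v l).2 := by
  induction l generalizing v with
  | nil => rfl
  | cons c rest ih =>
    simp only [List.zip_cons_cons, List.countP_cons, pvCnt]
    push_cast
    rw [ih c]
    split_ifs with h1 h2 <;> simp_all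


-- ===== VERDICT (by name: the statement is the Claim_ definition above) =====
theorem count_hp1_starts_stops_spec : Claim_equal_count_hp1_starts_stops := by
  intro levels _
  unfold Spec_count_hp1_starts_stops
  cases levels with
  | nil => rfl
  | cons h t =>
    rw [A_cons, foldA_some]
    simp only [count_hp1_starts_stops_alt, List.map_cons, List.tail_cons]
    rw [cntStarts_eq, cntStops_eq]
    simp
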